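-- pv_equiv track=rewrite | github.com/Szubie/advent_of_code_2019 | 4/solution_4.py | contains_exact_double
-- ===== SOURCE A (Python) =====
-- def contains_exact_double(num_string):
--     padded_num_string = "9" + num_string + "0"
--     for i in range(len(padded_num_string) - 3):
--         num_1, num_2, num_3, num_4 = padded_num_string[i:i+4]
--         if num_2 == num_3:
--             if num_1 != num_2 and num_4 != num_2:
--                 return True
--     return False
-- ===== SOURCE B (Python) =====
-- def contains_exact_double(num_string):
--     padded = "9" + num_string + "0"
--     runs = []
--     current, count = padded[0], 1
--     for ch in padded[1:]:
--         if ch == current: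
--             count += 1
--         else:
--             runs.append(count)
--             current, count = ch, 1
--     runs.append(count)
--     # the first and the last run contain the sentinel characters
--     return any(n == 2 for n in runs[1:-1])
-- ===== Notes on version B (the rewrite author's own statement) =====
-- stated objective: alternative
-- what changed: B replaces A's 4-character sliding-window scan over the padded string with building the run-length encoding of the padded string once and checking the interior runs for length exactly 2.
import Mathlib
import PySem

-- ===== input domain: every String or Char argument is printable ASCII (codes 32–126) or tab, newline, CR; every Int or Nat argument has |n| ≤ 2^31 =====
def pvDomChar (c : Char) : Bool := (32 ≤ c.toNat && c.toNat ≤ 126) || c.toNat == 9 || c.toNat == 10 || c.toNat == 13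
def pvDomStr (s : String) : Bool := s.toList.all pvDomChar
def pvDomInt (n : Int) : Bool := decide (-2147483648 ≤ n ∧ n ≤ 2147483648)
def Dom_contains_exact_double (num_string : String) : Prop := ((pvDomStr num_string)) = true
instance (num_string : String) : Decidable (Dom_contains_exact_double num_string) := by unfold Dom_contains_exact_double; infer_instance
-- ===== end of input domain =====

-- B replaces A's 4-character sliding-window scan by building the run-length encoding of the
-- padded string once and checking the interior runs for length exactly 2 (alternative algorithm).

-- ===== PORT A =====
-- A's for-loop with early return, over range(len(padded)-3); strings ported as char lists.
def pvCeAux (p : List Char) : List Int → Bool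
  | [] => false
  | i :: rest =>
    match PySem.List.slice p (some i) (some (i + 4)) with
    | [n1, n2, n3, n4] =>
      if n2 = n3 then
        if n1 ≠ n2 ∧ n4 ≠ n2 then true else pvCeAux p rest
      else pvCeAux p rest
    | _ => false  -- tuple unpacking of a slice of length ≠ 4: unreachable for i in range(len-3)

def contains_exact_double (num_string : String) : Bool :=
  let padded : List Char := '9' :: num_string.toList ++ ['0']
  pvCeAux padded (PySem.List.pyRange 0 ((padded.length : Int) - 3) 1)

-- ===== PORT B =====
-- B's grouping loop: runs = completed run lengths, (cur, count) = the run being read.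
def pvCeB (runs : List Nat) (cur : Char) (count : Nat) : List Char → List Nat
  | [] => runs ++ [count]
  | ch :: rest =>
    if ch = cur then pvCeB runs cur (count + 1) rest
    else pvCeB (runs ++ [count]) ch 1 rest

def contains_exact_double_alt (num_string : String) : Bool :=
  let padded : List Char := '9' :: num_string.toList ++ ['0']
  let runs := pvCeB [] (PySem.List.pyGetD padded 0 ' ') 1 (PySem.List.slice padded (some 1) none)
  (PySem.List.slice runs (some 1) (some (-1))).any (fun n => n == 2)

-- ===== PRECONDITION & SPEC =====
def Spec_contains_exact_double (num_string : String) (out : Bool) : Prop :=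
  out = contains_exact_double_alt num_string
instance (num_string : String) (out : Bool) : Decidable (Spec_contains_exact_double num_string out) := by
  unfold Spec_contains_exact_double; infer_instance

-- ===== CLAIM (what is proved, stated in full; the proofs are below) =====
def Claim_equal_contains_exact_double : Prop := ∀ (num_string : String), Dom_contains_exact_double num_string → Spec_contains_exact_double num_string (contains_exact_double num_string)

-- ===== LEMMAS AND PROOFS =====

-- A's scan as a two-character-state recursion over the remaining characters
def pvScan2 (a b : Char) : List Char → Bool
  | x :: y :: r => if b = x ∧ a ≠ b ∧ y ≠ b then true else pvScan2 b x (y :: r)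
  | _ => false

def pvScanW : List Char → Bool
  | a :: b :: rest => pvScan2 a b rest
  | _ => false

-- the common reference semantics: like a run tracker over the rest of the original string, but
-- a '0'-run reaching the very end never fires (base case) and the start value k = 3 makes the
-- leading run never fire — exactly what A's sentinel padding produces
def pvBm : Char → Nat → List Char → Bool
  | c, k, [] => k == 2 && c != '0'
  | c, k, x :: r => if x = c then pvBm c (k + 1) r else if k == 2 then true else pvBm x 1 r

lemma pvScanW_short (t : List Char) (h : t.length ≤ 3) : pvScanW t = false := by
  match t with
  | [] => rfl
  | [_] => rfl
  | [_, _] => rfl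
  | [_, _, _] => rfl
  | _ :: _ :: _ :: _ :: _ => exfalso; simp at h; omega

lemma pvCeAux_eq_scanW (p : List Char) :
    ∀ (fuel j : Nat), p.length - j ≤ fuel →
      pvCeAux p (PySem.List.pyRange (j : Int) ((p.length : Int) - 3) 1) = pvScanW (p.drop j) := by
  intro fuel
  induction fuel with
  | zero =>
    intro j hle
    have hn : p.length ≤ j := by omega
    rw [PySem.List.pyRange_one_eq_nil (by omega), List.drop_eq_nil_of_le hn]
    rfl
  | succ fuel ih =>
    intro j hle
    by_cases hend : (p.length : Int) - 3 ≤ (j : Int)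
    · have h3 : p.length ≤ j + 3 := by omega
      rw [PySem.List.pyRange_one_eq_nil hend, pvScanW_short _ (by rw [List.length_drop]; omega)]
      rfl
    · rw [not_le] at hend
      have hj3 : j + 3 < p.length := by omega
      obtain ⟨a, b, c, d, t, hd⟩ : ∃ a b c d t, p.drop j = a :: b :: c :: d :: t := by
        rcases hx : p.drop j with _ | ⟨a, _ | ⟨b, _ | ⟨c, _ | ⟨d, t⟩⟩⟩⟩
        · exfalso; have := congrArg List.length hx; simp at this; omega
        · exfalso; have := congrArg List.length hx; simp at this; omega
        · exfalso; have := congrArg List.length hx; simp at this; omega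
        · exfalso; have := congrArg List.length hx; simp at this; omega
        · exact ⟨a, b, c, d, t, rfl⟩
      have hsl : PySem.List.slice p (some (j : Int)) (some ((j : Int) + 4)) = [a, b, c, d] := by
        have h4 : PySem.List.slice p (some (j : Int)) (some ((j : Int) + 4)) = (p.drop j).take 4 := by
          have := PySem.List.slice_natCast_add p (j := j) (n := 4)
          simpa using this
        rw [h4, hd]
        rfl
      have hd1 : p.drop (j + 1) = b :: c :: d :: t := by
        have h1 : p.drop (j + 1) = (p.drop j).drop 1 := by rw [List.drop_drop]
        rw [h1, hd]
        rfl
      have hih : pvCeAux p (PySem.List.pyRange ((j : Int) + 1) ((p.length : Int) - 3) 1)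
          = pvScanW (p.drop (j + 1)) := by
        have hc : ((j : Int) + 1) = ((j + 1 : Nat) : Int) := by push_cast; ring
        rw [hc]
        exact ih (j + 1) (by omega)
      rw [PySem.List.pyRange_one_cons (by omega)]
      simp only [pvCeAux, hsl]
      rw [hih, hd1, hd]
      simp only [pvScanW, pvScan2]
      by_cases h1 : b = c
      · by_cases h2 : a ≠ b ∧ d ≠ b
        · simp [h1, if_pos h2]
        · simp [h1, if_neg h2]
      · simp [h1]

lemma pvBm_ge3 (r : List Char) : ∀ (c : Char) (k : Nat), 3 ≤ k → pvBm c k r = pvBm c 3 r := by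
  induction r with
  | nil =>
    intro c k hk
    have h1 : (k == 2) = false := by simp; omega
    simp [pvBm, h1]
  | cons x r' ih =>
    intro c k hk
    by_cases hxc : x = c
    · subst hxc
      have e1 : pvBm x k (x :: r') = pvBm x (k + 1) r' := by simp [pvBm]
      have e2 : pvBm x 3 (x :: r') = pvBm x 4 r' := by simp [pvBm]
      rw [e1, e2, ih x (k + 1) (by omega), ih x 4 (by omega)]
    · have h1 : (k == 2) = false := by simp; omega
      simp [pvBm, hxc, h1]

lemma pvScan2_cons (a b x : Char) (t : List Char) (ht : t ≠ []) :
    pvScan2 a b (x :: t) = if b = x ∧ a ≠ b ∧ t.headD ' ' ≠ b then true else pvScan2 b x t := by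
  cases t with
  | nil => exact absurd rfl ht
  | cons y u => rfl

lemma pvScan2_bm (r : List Char) :
    (∀ a c, a ≠ c → pvScan2 a c (r ++ ['0']) = pvBm c 1 r) ∧
    (∀ c, pvScan2 c c (r ++ ['0']) = pvBm c 3 r) := by
  induction r with
  | nil =>
    exact ⟨fun a c _ => rfl, fun c => rfl⟩
  | cons x r' ih =>
    obtain ⟨ihM, ih2⟩ := ih
    have hne : r' ++ ['0'] ≠ [] := by simp
    constructor
    · intro a c hac
      rw [show (x :: r') ++ ['0'] = x :: (r' ++ ['0']) from rfl, pvScan2_cons a c x _ hne]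
      by_cases hxc : x = c
      · subst hxc
        cases r' with
        | nil =>
          by_cases h0 : x = '0'
          · subst h0
            simp [pvScan2, pvBm, hac]
          · rw [if_pos ⟨rfl, hac, by simpa using fun h => h0 h.symm⟩]
            simp [pvBm, h0]
        | cons h r'' =>
          by_cases hhc : h = x
          · subst hhc
            rw [if_neg (by simp)]
            rw [ih2 h]
            have e1 : pvBm h 3 (h :: r'') = pvBm h 4 r'' := by simp [pvBm]
            have e2 : pvBm h 1 (h :: h :: r'') = pvBm h 3 r'' := by simp [pvBm]
            rw [e1, e2, pvBm_ge3 r'' h 4 (by omega)]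
          · rw [if_pos ⟨rfl, hac, by simpa using hhc⟩]
            simp [pvBm, hhc]
      · rw [if_neg (fun hcc => hxc hcc.1.symm)]
        rw [ihM c x (fun h => hxc h.symm)]
        simp [pvBm, hxc]
    · intro c
      rw [show (x :: r') ++ ['0'] = x :: (r' ++ ['0']) from rfl, pvScan2_cons c c x _ hne]
      rw [if_neg (fun hcc => hcc.2.1 rfl)]
      by_cases hxc : x = c
      · subst hxc
        rw [ih2 x]
        have e : pvBm x 3 (x :: r') = pvBm x 4 r' := by simp [pvBm]
        rw [e, pvBm_ge3 r' x 4 (by omega)]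
      · rw [ihM c x (fun h => hxc h.symm)]
        simp [pvBm, hxc]

-- A equals the reference semantics
lemma pvCharA (s : String) : contains_exact_double s = pvBm '9' 3 s.toList := by
  have hmain : pvCeAux ('9' :: s.toList ++ ['0'])
      (PySem.List.pyRange 0 (((('9' :: s.toList ++ ['0']).length : Int)) - 3) 1)
      = pvScanW ('9' :: s.toList ++ ['0']) := by
    have := pvCeAux_eq_scanW ('9' :: s.toList ++ ['0']) ('9' :: s.toList ++ ['0']).length 0
      (by omega)
    simpa using this
  show pvCeAux ('9' :: s.toList ++ ['0'])
      (PySem.List.pyRange 0 (((('9' :: s.toList ++ ['0']).length : Int)) - 3) 1)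
      = pvBm '9' 3 s.toList
  rw [hmain]
  cases hL : s.toList with
  | nil => rfl
  | cons c r =>
    have hw : pvScanW ('9' :: (c :: r) ++ ['0']) = pvScan2 '9' c (r ++ ['0']) := rfl
    rw [hw]
    by_cases hc9 : c = '9'
    · subst hc9
      rw [(pvScan2_bm r).2 '9']
      have e : pvBm '9' 3 ('9' :: r) = pvBm '9' 4 r := by simp [pvBm]
      rw [e, pvBm_ge3 r '9' 4 (by omega)]
    · rw [(pvScan2_bm r).1 '9' c (fun h => hc9 h.symm)]
      simp [pvBm, hc9]

-- B's grouping loop without its accumulator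
def pvCollect : Char → Nat → List Char → List Nat
  | _, count, [] => [count]
  | cur, count, ch :: rest =>
    if ch = cur then pvCollect cur (count + 1) rest
    else count :: pvCollect ch 1 rest

lemma pvCeB_eq (r : List Char) :
    ∀ (runs : List Nat) (cur : Char) (count : Nat),
      pvCeB runs cur count r = runs ++ pvCollect cur count r := by
  induction r with
  | nil => intro runs cur count; rfl
  | cons ch rest ih =>
    intro runs cur count
    by_cases hc : ch = cur
    · simp only [pvCeB, pvCollect, if_pos hc]
      exact ih runs cur (count + 1)
    · simp only [pvCeB, pvCollect, if_neg hc]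
      rw [ih (runs ++ [count]) ch 1, List.append_assoc]
      rfl

lemma pvCollect_ne_nil (r : List Char) : ∀ c k, pvCollect c k r ≠ [] := by
  induction r with
  | nil => intro c k; simp [pvCollect]
  | cons ch rest ih =>
    intro c k
    by_cases hc : ch = c
    · simp only [pvCollect, if_pos hc]
      exact ih c (k + 1)
    · simp [pvCollect, if_neg hc]

-- dropping the final run, "some completed run has length 2" is the reference semantics
lemma pvFbm (r : List Char) :
    ∀ (c : Char) (k : Nat),
      ((pvCollect c k (r ++ ['0'])).dropLast).any (fun n => n == 2) = pvBm c k r := by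
  induction r with
  | nil =>
    intro c k
    by_cases h0 : c = '0'
    · subst h0
      simp [pvCollect, pvBm]
    · have hc : ¬ ('0' = c) := fun h => h0 h.symm
      simp [pvCollect, pvBm, hc, h0]
  | cons x r' ih =>
    intro c k
    by_cases hx : x = c
    · rw [show (x :: r') ++ ['0'] = x :: (r' ++ ['0']) from rfl]
      simp only [pvCollect, if_pos hx, pvBm]
      exact ih c (k + 1)
    · rw [show (x :: r') ++ ['0'] = x :: (r' ++ ['0']) from rfl]
      simp only [pvCollect, if_neg hx, pvBm]
      rw [List.dropLast_cons_of_ne_nil (pvCollect_ne_nil (r' ++ ['0']) x 1)]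
      rw [List.any_cons, ih x 1]
      by_cases hk : k = 2
      · subst hk; simp
      · have hkf : (k == 2) = false := by simp; omega
        simp [hkf]

-- additionally dropping the first run gives A's leading-run masking
lemma pvGbm (r : List Char) :
    ∀ (k : Nat),
      ((pvCollect '9' k (r ++ ['0'])).tail.dropLast).any (fun n => n == 2) = pvBm '9' 3 r := by
  induction r with
  | nil =>
    intro k
    simp [pvCollect, pvBm]
  | cons x r' ih =>
    intro k
    by_cases hx : x = '9'
    · rw [hx]
      rw [show ('9' :: r') ++ ['0'] = '9' :: (r' ++ ['0']) from rfl]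
      simp only [pvCollect, if_true]
      rw [ih (k + 1)]
      have e : pvBm '9' 3 ('9' :: r') = pvBm '9' 4 r' := by simp [pvBm]
      rw [e, pvBm_ge3 r' '9' 4 (by omega)]
    · rw [show (x :: r') ++ ['0'] = x :: (r' ++ ['0']) from rfl]
      simp only [pvCollect, if_neg hx]
      rw [List.tail_cons, pvFbm r' x 1]
      simp [pvBm, hx]

-- runs[1:-1] is tail + dropLast
lemma pvSlice1neg1 (xs : List Nat) :
    PySem.List.slice xs (some 1) (some (-1)) = xs.tail.dropLast := by
  simp [PySem.List.slice, PySem.List.clampIdx]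
  cases xs with
  | nil => simp
  | cons a t =>
    rw [if_neg (List.cons_ne_nil a t)]
    have hmin : min 1 (a :: t).length = 1 := by simp
    rw [hmin]
    have hcnt : ((((a :: t).length : Int)) + -1).toNat - 1 = t.length - 1 := by
      simp
    rw [hcnt, List.tail_cons, List.dropLast_eq_take]
    rfl

lemma pvCharB (s : String) : contains_exact_double_alt s = pvBm '9' 3 s.toList := by
  show (PySem.List.slice
      (pvCeB [] (PySem.List.pyGetD ('9' :: s.toList ++ ['0']) 0 ' ') 1
        (PySem.List.slice ('9' :: s.toList ++ ['0']) (some 1) none))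
      (some 1) (some (-1))).any (fun n => n == 2) = pvBm '9' 3 s.toList
  have hg : PySem.List.pyGetD ('9' :: s.toList ++ ['0']) 0 ' ' = '9' := by simp [pysem]
  rw [hg]
  rw [PySem.List.slice_from_one]
  rw [show ('9' :: s.toList ++ ['0']).tail = s.toList ++ ['0'] from rfl]
  rw [pvCeB_eq, List.nil_append, pvSlice1neg1]
  exact pvGbm s.toList 1

-- ===== VERDICT (by name: the statement is the Claim_ definition above) =====
theorem contains_exact_double_spec : Claim_equal_contains_exact_double := by
  intro s _
  show contains_exact_double s = contains_exact_double_alt s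
  rw [pvCharA, pvCharB]
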